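-- pv_equiv track=rewrite | github.com/hojoungjang/programming-exercises | 12891-DNA-비밀번호/solution.py | solution
-- ===== SOURCE A (Python) =====
-- DNA_CHAR_IDX = {"A": 0, "C": 1, "G": 2, "T": 3}
--
-- def valid(sub_str_counts, counts):
--     for sub_count, count in zip(sub_str_counts, counts):
--         if sub_count < count:
--             return False
--     return True
--
-- def solution(dna, length, counts):
--     sub_str_counts = [0 for _ in range(len(DNA_CHAR_IDX))]
--     for char in dna[:length]:
--         sub_str_counts[DNA_CHAR_IDX[char]] += 1
--
--     ans = 1 if valid(sub_str_counts, counts) else 0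
--
--     for i in range(length, len(dna)):
--         sub_str_counts[DNA_CHAR_IDX[dna[i-length]]] -= 1
--         sub_str_counts[DNA_CHAR_IDX[dna[i]]] += 1
--         if valid(sub_str_counts, counts):
--             ans += 1
--     return ans
-- ===== SOURCE B (Python) =====
-- DNA_CHAR_IDX = {"A": 0, "C": 1, "G": 2, "T": 3}
--
-- def solution(dna, length, counts):
--     # prefix[j][k] = number of occurrences of "ACGT"[k] in dna[:j]
--     prefix = [[0, 0, 0, 0]]
--     for ch in dna:
--         row = list(prefix[-1])
--         row[DNA_CHAR_IDX[ch]] += 1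
--         prefix.append(row)
--     ans = 0
--     for i in range(len(dna) - length + 1):
--         hi, lo = prefix[i + length], prefix[i]
--         if all(hi[k] - lo[k] >= c for k, c in zip(range(4), counts)):
--             ans += 1
--     return ans
-- ===== Notes on version B (the rewrite author's own statement) =====
-- stated objective: alternative
-- what changed: Replaces A's rolling window (decrement outgoing char, increment incoming char per step) with a build-then-scan: four cumulative prefix-count rows are built once, then each window's counts are obtained as prefix differences.
-- intended difference: On inputs with length > len(dna) whose whole-string character counts already meet the minimums, A returns 1 (it tests the too-short window dna[:length] = dna) while B returns 0; B's value is intended since no substring of the required length exists. — e.g. on solution("AC", 3, []): A returns 1, B returns 0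
import Mathlib
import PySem

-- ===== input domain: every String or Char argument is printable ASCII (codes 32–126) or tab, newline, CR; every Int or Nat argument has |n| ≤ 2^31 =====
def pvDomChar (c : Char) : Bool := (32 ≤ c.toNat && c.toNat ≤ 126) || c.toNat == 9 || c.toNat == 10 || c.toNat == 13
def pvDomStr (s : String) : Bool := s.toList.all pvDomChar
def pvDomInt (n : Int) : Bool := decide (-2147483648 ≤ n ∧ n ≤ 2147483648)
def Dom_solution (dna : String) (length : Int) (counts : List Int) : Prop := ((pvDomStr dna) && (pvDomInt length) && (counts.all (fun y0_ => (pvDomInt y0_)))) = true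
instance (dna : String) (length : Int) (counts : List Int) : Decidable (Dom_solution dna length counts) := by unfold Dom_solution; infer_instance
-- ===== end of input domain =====

-- B replaces A's rolling-window count updates by a build-then-scan over four cumulative
-- prefix-count arrays (objective: alternative decomposition, same asymptotic cost).
-- On length > len(dna) with satisfiable minimums A counts the too-short whole string once; B
-- counts no window there (see D_solution below).

-- ===== PORT A =====
-- DNA_CHAR_IDX = {"A": 0, "C": 1, "G": 2, "T": 3}
def DNA_CHAR_IDX : PySem.Dict Char Nat := PySem.Dict.ofList [('A', 0), ('C', 1), ('G', 2), ('T', 3)]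

-- DNA_CHAR_IDX[char]; the `.getD 0` arm is Python's KeyError, excluded by Pre_solution
def dnaIdx (c : Char) : Nat := (PySem.Dict.get? DNA_CHAR_IDX c).getD 0

-- helper `valid`: the early-return loop over zip is the all-fold
def pyValid (sub_str_counts : List Int) (counts : List Int) : Bool :=
  (sub_str_counts.zip counts).all (fun p => !decide (p.1 < p.2))

def solution (dna : String) (length : Int) (counts : List Int) : Int :=
  let s := dna.toList
  let sub0 := (PySem.List.slice s none (some length)).foldl
    (fun sub c => sub.set (dnaIdx c) (sub.getD (dnaIdx c) 0 + 1))
    (List.replicate 4 (0 : Int))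
  let ans0 : Int := if pyValid sub0 counts then 1 else 0
  ((PySem.List.pyRange length (s.length : Int) 1).foldl
    (fun (st : List Int × Int) i =>
      -- the `.getD ' '` arms are Python's IndexError, excluded by Pre_solution
      let j1 := dnaIdx ((PySem.List.pyGet? s (i - length)).getD ' ')
      let s1 := st.1.set j1 (st.1.getD j1 0 - 1)
      let j2 := dnaIdx ((PySem.List.pyGet? s i).getD ' ')
      let s2 := s1.set j2 (s1.getD j2 0 + 1)
      (s2, if pyValid s2 counts then st.2 + 1 else st.2))
    (sub0, ans0)).2

-- ===== PORT B =====
def solution_alt (dna : String) (length : Int) (counts : List Int) : Int :=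
  let s := dna.toList
  -- prefix[j][k] = number of occurrences of "ACGT"[k] in dna[:j]
  let pfx := s.foldl
    (fun (p : List (List Int)) ch =>
      let last := (PySem.List.pyGet? p (-1)).getD []        -- prefix[-1]
      let row := last.set (dnaIdx ch) (last.getD (dnaIdx ch) 0 + 1)
      p ++ [row])
    [[0, 0, 0, 0]]
  (PySem.List.pyRange 0 ((s.length : Int) - length + 1) 1).foldl
    (fun ans i =>
      let hi := PySem.List.pyGetD pfx (i + length) []
      let lo := PySem.List.pyGetD pfx i []
      if ((List.range 4).zip counts).all
           (fun p => decide (hi.getD p.1 0 - lo.getD p.1 0 ≥ p.2))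
      then ans + 1 else ans)
    0

-- ===== PRECONDITION & SPEC =====
-- count vector of a character list (used by D_solution and by the proofs)
def cntv (l : List Char) : List Int :=
  [(l.count 'A' : Int), (l.count 'C' : Int), (l.count 'G' : Int), (l.count 'T' : Int)]

-- Pre_ excludes exactly the inputs on which A raises: a character outside "ACGT" (KeyError in
-- DNA_CHAR_IDX) or a negative length (the slide loop then always reads an out-of-range index:
-- IndexError). On every input satisfying Pre_ the Python A returns normally.
def Pre_solution (dna : String) (length : Int) (counts : List Int) : Prop :=
  (dna.toList.all (fun c => c ∈ (['A', 'C', 'G', 'T'] : List Char))) = true ∧ 0 ≤ length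
instance (dna : String) (length : Int) (counts : List Int) : Decidable (Pre_solution dna length counts) := by unfold Pre_solution; infer_instance

def pvWitness_solution : String × Int × List Int := ("ACGTAC", 3, [1, 1, 0, 0])

-- On inputs with length > len(dna) whose whole-string character counts already meet the minimums,
-- A returns 1 (it tests the too-short window dna[:length] = dna), B returns 0; B's value is the
-- intended one, since no substring of the required length exists.
def D_solution (dna : String) (length : Int) (counts : List Int) : Prop :=
  (dna.toList.length : Int) < length ∧
    (((cntv dna.toList).zip counts).all (fun p => decide (p.2 ≤ p.1))) = true
instance (dna : String) (length : Int) (counts : List Int) : Decidable (D_solution dna length counts) := by unfold D_solution; infer_instance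

def Spec_solution (dna : String) (length : Int) (counts : List Int) (out : Int) : Prop :=
  ¬ D_solution dna length counts → out = solution_alt dna length counts
instance (dna : String) (length : Int) (counts : List Int) (out : Int) : Decidable (Spec_solution dna length counts out) := by unfold Spec_solution; infer_instance

def pvDiffWitness_solution : String × Int × List Int := ("AC", 3, [])
def pvDiffWitnessOut_solution : Int × Int := (1, 0)

-- ===== CLAIM (what is proved, stated in full; the proofs are below) =====
def Claim_unchanged_solution : Prop := ∀ (dna : String) (length : Int) (counts : List Int), Dom_solution dna length counts → Pre_solution dna length counts → Spec_solution dna length counts (solution dna length counts)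
def Claim_changed_solution : Prop := Dom_solution (pvDiffWitness_solution.1) (pvDiffWitness_solution.2.1) (pvDiffWitness_solution.2.2) ∧ Pre_solution (pvDiffWitness_solution.1) (pvDiffWitness_solution.2.1) (pvDiffWitness_solution.2.2) ∧ D_solution (pvDiffWitness_solution.1) (pvDiffWitness_solution.2.1) (pvDiffWitness_solution.2.2) ∧ solution (pvDiffWitness_solution.1) (pvDiffWitness_solution.2.1) (pvDiffWitness_solution.2.2) = pvDiffWitnessOut_solution.1 ∧ solution_alt (pvDiffWitness_solution.1) (pvDiffWitness_solution.2.1) (pvDiffWitness_solution.2.2) = pvDiffWitnessOut_solution.2 ∧ pvDiffWitnessOut_solution.1 ≠ pvDiffWitnessOut_solution.2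
def Claim_exact_solution : Prop := ∀ (dna : String) (length : Int) (counts : List Int), Dom_solution dna length counts → Pre_solution dna length counts → D_solution dna length counts → solution dna length counts ≠ solution_alt dna length counts

-- ===== LEMMAS AND PROOFS =====

lemma dnaIdx_A : dnaIdx 'A' = 0 := by decide
lemma dnaIdx_C : dnaIdx 'C' = 1 := by decide
lemma dnaIdx_G : dnaIdx 'G' = 2 := by decide
lemma dnaIdx_T : dnaIdx 'T' = 3 := by decide

lemma cnt_add (l : List Char) (c : Char) (hc : c ∈ (['A','C','G','T'] : List Char)) :
    (cntv l).set (dnaIdx c) ((cntv l).getD (dnaIdx c) 0 + 1) = cntv (l ++ [c]) := by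
  fin_cases hc <;>
    simp [cntv, dnaIdx_A, dnaIdx_C, dnaIdx_G, dnaIdx_T, List.count_append]

lemma cnt_sub (l : List Char) (c : Char) (hc : c ∈ (['A','C','G','T'] : List Char)) :
    (cntv (c :: l)).set (dnaIdx c) ((cntv (c :: l)).getD (dnaIdx c) 0 - 1) = cntv l := by
  fin_cases hc <;>
    simp [cntv, dnaIdx_A, dnaIdx_C, dnaIdx_G, dnaIdx_T, List.count_cons]

lemma decide_not_lt (a b : Int) : (!decide (a < b)) = decide (b ≤ a) := by
  by_cases h : a < b <;> simp [h] <;> omega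

lemma cntv_nil : cntv [] = [0, 0, 0, 0] := by simp [cntv]

lemma initFold (l : List Char) (hl : ∀ c ∈ l, c ∈ (['A','C','G','T'] : List Char)) :
    l.foldl (fun sub c => sub.set (dnaIdx c) (sub.getD (dnaIdx c) 0 + 1))
      (List.replicate 4 (0 : Int)) = cntv l := by
  induction l using List.reverseRecOn with
  | nil => simp [cntv_nil]
  | append_singleton t c ih =>
      rw [List.foldl_append]
      rw [ih (fun x hx => hl x (by simp [hx]))]
      simpa using cnt_add t c (hl c (by simp))

lemma valid_idx_eq (h0 h1 h2 h3 l0 l1 l2 l3 : Int) (counts : List Int) :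
    (((List.range 4).zip counts).all
      (fun p => decide (([h0,h1,h2,h3] : List Int).getD p.1 0 - ([l0,l1,l2,l3] : List Int).getD p.1 0 ≥ p.2)))
    = pyValid [h0-l0, h1-l1, h2-l2, h3-l3] counts := by
  have hr : List.range 4 = [0,1,2,3] := rfl
  match counts with
  | [] => rfl
  | [a] => simp [hr, pyValid, decide_not_lt, ge_iff_le]
  | [a,b] => simp [hr, pyValid, decide_not_lt, ge_iff_le]
  | [a,b,c] => simp [hr, pyValid, decide_not_lt, ge_iff_le]
  | a::b::c::d::rest => simp [hr, pyValid, decide_not_lt, ge_iff_le]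

lemma valid_le_eq (v counts : List Int) :
    pyValid v counts = ((v.zip counts).all (fun p => decide (p.2 ≤ p.1))) := by
  unfold pyValid
  induction (v.zip counts) with
  | nil => rfl
  | cons p t ih => simp [decide_not_lt]

lemma pyGet_neg_one_append {α : Type} (l : List α) (x : α) :
    PySem.List.pyGet? (l ++ [x]) (-1) = some x := by
  simp [PySem.List.pyGet?, PySem.List.pyIdx?]

lemma prefixFold (t : List Char) (ht : ∀ c ∈ t, c ∈ (['A','C','G','T'] : List Char)) :
    t.foldl (fun (p : List (List Int)) ch =>
        let last := (PySem.List.pyGet? p (-1)).getD []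
        let row := last.set (dnaIdx ch) (last.getD (dnaIdx ch) 0 + 1)
        p ++ [row]) [[0,0,0,0]]
    = (List.range (t.length + 1)).map (fun j => cntv (t.take j)) := by
  induction t using List.reverseRecOn with
  | nil => simp [cntv_nil]
  | append_singleton t c ih =>
      rw [List.foldl_append, ih (fun x hx => ht x (by simp [hx]))]
      simp only [List.foldl_cons, List.foldl_nil]
      rw [List.range_succ, List.map_append]
      simp only [List.map_cons, List.map_nil]
      rw [pyGet_neg_one_append]
      simp only [Option.getD_some]
      rw [show ((t.take t.length)) = t from List.take_of_length_le (le_refl _)]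
      rw [cnt_add t c (ht c (by simp))]
      rw [show (t ++ [c]).length + 1 = (t.length + 1) + 1 by simp]
      rw [List.range_succ (n := t.length + 1), List.map_append]
      congr 1
      · rw [List.range_succ, List.map_append, List.map_cons, List.map_nil]
        congr 1
        · apply List.map_congr_left
          intro j hj
          rw [List.take_append_of_le_length (Nat.le_of_lt (List.mem_range.mp hj))]
        · rw [List.take_append_of_le_length (le_refl _),
              List.take_of_length_le (le_refl _)]
      · simp [List.take_of_length_le (by simp : (t ++ [c]).length ≤ t.length + 1)]

lemma pyRange_nil {a b : Int} (h : b ≤ a) : PySem.List.pyRange a b 1 = [] := by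
  simp [PySem.List.pyRange]; omega

lemma zero_step (c : Char) (hc : c ∈ (['A','C','G','T'] : List Char)) :
    ((cntv []).set (dnaIdx c) ((cntv []).getD (dnaIdx c) 0 - 1)).set (dnaIdx c)
      ((((cntv []).set (dnaIdx c) ((cntv []).getD (dnaIdx c) 0 - 1)).getD (dnaIdx c) 0) + 1)
    = cntv [] := by fin_cases hc <;> decide

set_option maxRecDepth 8192 in
lemma ALoop (s : List Char) (hs : ∀ c ∈ s, c ∈ (['A','C','G','T'] : List Char))
    (L : Nat) (counts : List Int) (a0 : Int) :
    ∀ m, L ≤ m → m ≤ s.length →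
    (PySem.List.pyRange (L : Int) (m : Int) 1).foldl
      (fun (st : List Int × Int) i =>
        let j1 := dnaIdx ((PySem.List.pyGet? s (i - (L : Int))).getD ' ')
        let s1 := st.1.set j1 (st.1.getD j1 0 - 1)
        let j2 := dnaIdx ((PySem.List.pyGet? s i).getD ' ')
        let s2 := s1.set j2 (s1.getD j2 0 + 1)
        (s2, if pyValid s2 counts then st.2 + 1 else st.2))
      (cntv (s.take L), a0)
    = (cntv ((s.drop (m - L)).take L),
       a0 + ((List.range (m - L)).countP
               (fun k => pyValid (cntv ((s.drop (k + 1)).take L)) counts) : Int)) := by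
  intro m hm
  induction m, hm using Nat.le_induction with
  | base =>
      intro _
      rw [pyRange_nil (le_refl _)]
      simp
  | succ m hm ih =>
      intro hmn
      have hmn' : m ≤ s.length := Nat.le_of_succ_le hmn
      have hmlt : m < s.length := hmn
      rw [show ((m + 1 : Nat) : Int) = (m : Int) + 1 by push_cast; ring]
      rw [PySem.List.pyRange_one_succ_right (by exact_mod_cast hm)]
      rw [List.foldl_append, ih hmn']
      simp only [List.foldl_cons, List.foldl_nil]
      have hsub : ((m : Int) - (L : Int)) = ((m - L : Nat) : Int) := by
        push_cast [Nat.cast_sub hm]; ring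
      have hmL : m - L < s.length := Nat.lt_of_le_of_lt (Nat.sub_le _ _) hmlt
      have e1 : ((PySem.List.pyGet? s ((m : Int) - (L : Int))).getD ' ') = s[m - L] := by
        rw [hsub, PySem.List.pyGet?_natCast, List.getElem?_eq_getElem hmL]; rfl
      have e2 : ((PySem.List.pyGet? s ((m : Nat) : Int)).getD ' ') = s[m] := by
        rw [PySem.List.pyGet?_natCast, List.getElem?_eq_getElem hmlt]; rfl
      rw [e1, e2]
      have hcm : s[m] ∈ (['A','C','G','T'] : List Char) := hs _ (List.getElem_mem _)
      have hcmL : s[m - L] ∈ (['A','C','G','T'] : List Char) := hs _ (List.getElem_mem _)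
      have key : ((cntv ((s.drop (m - L)).take L)).set (dnaIdx s[m - L])
            ((cntv ((s.drop (m - L)).take L)).getD (dnaIdx s[m - L]) 0 - 1)).set (dnaIdx s[m])
            (((cntv ((s.drop (m - L)).take L)).set (dnaIdx s[m - L])
                ((cntv ((s.drop (m - L)).take L)).getD (dnaIdx s[m - L]) 0 - 1)).getD (dnaIdx s[m]) 0 + 1)
          = cntv ((s.drop (m + 1 - L)).take L) := by
        rcases Nat.eq_zero_or_pos L with hL | hL
        · subst hL
          simpa using zero_step s[m] hcm
        · obtain ⟨k, rfl⟩ : ∃ k, L = k + 1 := ⟨L - 1, by omega⟩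
          have htake : (s.drop (m - (k + 1))).take (k + 1)
              = s[m - (k + 1)] :: (s.drop (m - (k + 1) + 1)).take k := by
            rw [List.drop_eq_getElem_cons hmL, List.take_succ_cons]
          have hlen : k < (s.drop (m - (k + 1) + 1)).length := by
            simp only [List.length_drop]; omega
          have happ : (s.drop (m - (k + 1) + 1)).take k ++ [s[m]]
              = (s.drop (m + 1 - (k + 1))).take (k + 1) := by
            rw [show m + 1 - (k + 1) = m - (k + 1) + 1 by omega]
            rw [List.take_add_one, List.getElem?_eq_getElem hlen]
            congr 1
            have hidx : m - (k + 1) + 1 + k = m := by omega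
            simp only [List.getElem_drop, Option.toList_some, hidx]
          rw [htake, cnt_sub _ _ hcmL, cnt_add _ _ hcm, happ]
      rw [Prod.mk.injEq]
      refine ⟨key, ?_⟩
      have hrange : m + 1 - L = (m - L) + 1 := by omega
      have harg : m - L + 1 = m + 1 - L := by omega
      rw [hrange, List.range_succ, List.countP_append]
      simp only [List.countP_cons, List.countP_nil, harg]
      rw [key]
      split_ifs with hv <;> push_cast <;> ring

lemma A_closed (dna : String) (length : Int) (counts : List Int)
    (hall : ∀ c ∈ dna.toList, c ∈ (['A','C','G','T'] : List Char))
    (h0 : 0 ≤ length) (hle : length ≤ (dna.toList.length : Int)) :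
    solution dna length counts
      = ((List.range (dna.toList.length - length.toNat + 1)).countP
          (fun k => pyValid (cntv ((dna.toList.drop k).take length.toNat)) counts) : Int) := by
  have hcast : ((length.toNat : Nat) : Int) = length := Int.toNat_of_nonneg h0
  have hLn : length.toNat ≤ dna.toList.length := by omega
  simp only [solution]
  rw [← hcast, PySem.List.slice_to dna.toList (Int.natCast_nonneg _)]
  rw [Int.toNat_natCast]
  rw [initFold _ (fun c hc => hall c (List.mem_of_mem_take hc))]
  rw [ALoop dna.toList hall length.toNat counts _ dna.toList.length hLn (le_refl _)]
  rw [List.range_succ_eq_map, List.countP_cons, List.countP_map]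
  simp only [List.drop_zero]
  have hpred : ((fun k => pyValid (cntv (List.take length.toNat (List.drop k dna.toList))) counts) ∘ Nat.succ)
      = (fun k => pyValid (cntv (List.take length.toNat (List.drop (1 + k) dna.toList))) counts) := by
    funext k
    simp [Function.comp, Nat.add_comm 1 k]
  rw [hpred]
  split_ifs with hv <;> push_cast [hv] <;> ring

lemma alt_closed (dna : String) (length : Int) (counts : List Int)
    (hall : ∀ c ∈ dna.toList, c ∈ (['A','C','G','T'] : List Char))
    (h0 : 0 ≤ length) (hle : length ≤ (dna.toList.length : Int)) :
    solution_alt dna length counts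
      = ((List.range (dna.toList.length - length.toNat + 1)).countP
          (fun k => pyValid (cntv ((dna.toList.drop k).take length.toNat)) counts) : Int) := by
  have hcast : ((length.toNat : Nat) : Int) = length := Int.toNat_of_nonneg h0
  have hLn : length.toNat ≤ dna.toList.length := by omega
  set s := dna.toList with hsdef
  set L := length.toNat with hLdef
  set n := s.length with hndef
  simp only [solution_alt]
  rw [prefixFold s hall]
  rw [← hcast]
  rw [show ((n : Int) - (L : Int) + 1) = ((n - L + 1 : Nat) : Int) by push_cast [hLn]; ring]
  rw [PySem.List.pyRange_zero_natCast, List.foldl_map]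
  rw [PySem.List.foldl_congr_mem _ _
    (fun (ans : Int) (k : Nat) =>
      if pyValid (cntv ((s.drop k).take L)) counts then ans + 1 else ans) 0 ?hg]
  case hg =>
    intro acc k hk
    have hk' : k < n - L + 1 := List.mem_range.mp hk
    have hkL : k + L < n + 1 := by omega
    have e1 : ((k : Int) + (L : Int)) = ((k + L : Nat) : Int) := by push_cast; ring
    rw [e1, PySem.List.pyGetD_natCast, PySem.List.pyGetD_natCast,
        PySem.List.getD_map_range _ _ _ _ hkL,
        PySem.List.getD_map_range _ _ _ _ (by omega : k < n + 1)]
    have hw : ∀ c : Char, (List.count c (s.take (k + L)) : Int) - (List.count c (s.take k) : Int)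
        = (List.count c ((s.drop k).take L) : Int) := by
      intro c
      rw [List.take_add, List.count_append]
      push_cast; ring
    have hcnt : cntv (s.take (k + L)) = [((s.take k).count 'A' : Int) + ((s.drop k).take L).count 'A',
        ((s.take k).count 'C' : Int) + ((s.drop k).take L).count 'C',
        ((s.take k).count 'G' : Int) + ((s.drop k).take L).count 'G',
        ((s.take k).count 'T' : Int) + ((s.drop k).take L).count 'T'] := by
      simp only [cntv, List.take_add, List.count_append]
      push_cast; rfl
    rw [hcnt, show cntv (s.take k) = [((s.take k).count 'A' : Int), ((s.take k).count 'C' : Int),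
        ((s.take k).count 'G' : Int), ((s.take k).count 'T' : Int)] from rfl]
    rw [valid_idx_eq]
    congr 1
    simp only [cntv]
    norm_num
  rw [PySem.List.foldl_if_add_one (fun k => pyValid (cntv ((s.drop k).take L)) counts)]
  simp

lemma A_big (dna : String) (length : Int) (counts : List Int)
    (hall : ∀ c ∈ dna.toList, c ∈ (['A','C','G','T'] : List Char))
    (h0 : 0 ≤ length) (hn : (dna.toList.length : Int) < length) :
    solution dna length counts = if pyValid (cntv dna.toList) counts then 1 else 0 := by
  simp only [solution]
  rw [PySem.List.slice_to dna.toList h0,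
      List.take_of_length_le (by omega : dna.toList.length ≤ length.toNat)]
  rw [initFold _ hall]
  rw [pyRange_nil (le_of_lt hn)]
  simp

lemma alt_big (dna : String) (length : Int) (counts : List Int)
    (hn : (dna.toList.length : Int) < length) :
    solution_alt dna length counts = 0 := by
  simp only [solution_alt]
  rw [pyRange_nil (by omega : (dna.toList.length : Int) - length + 1 ≤ 0)]
  simp

lemma pre_chars {dna : String} (h : (dna.toList.all (fun c => c ∈ (['A','C','G','T'] : List Char))) = true) :
    ∀ c ∈ dna.toList, c ∈ (['A','C','G','T'] : List Char) := by
  intro c hc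
  simpa using List.all_eq_true.mp h c hc

-- ===== VERDICT (by name: the statement is the Claim_ definition above) =====
theorem solution_spec : Claim_unchanged_solution := by
  unfold Claim_unchanged_solution
  intro dna length counts _ hpre
  unfold Spec_solution
  intro hnd
  obtain ⟨hall', h0⟩ := hpre
  have hall := pre_chars hall'
  by_cases hle : length ≤ (dna.toList.length : Int)
  · rw [A_closed dna length counts hall h0 hle, alt_closed dna length counts hall h0 hle]
  · have hn : (dna.toList.length : Int) < length := lt_of_not_ge hle
    have hvfalse : pyValid (cntv dna.toList) counts = false := by
      rw [valid_le_eq]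
      rcases h : ((cntv dna.toList).zip counts).all (fun p => decide (p.2 ≤ p.1)) with _ | _
      · rfl
      · exact absurd ⟨hn, h⟩ hnd
    rw [A_big dna length counts hall h0 hn, alt_big dna length counts hn, hvfalse]
    simp

theorem solution_changed : Claim_changed_solution := by unfold Claim_changed_solution; decide

theorem solution_tight : Claim_exact_solution := by
  unfold Claim_exact_solution
  intro dna length counts _ hpre hd
  obtain ⟨hall', h0⟩ := hpre
  obtain ⟨hn, hsat⟩ := hd
  have hall := pre_chars hall'
  have hvtrue : pyValid (cntv dna.toList) counts = true := by
    rw [valid_le_eq]; exact hsat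
  rw [A_big dna length counts hall h0 hn, alt_big dna length counts hn, hvtrue]
  simp
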